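-- pv_equiv track=rewrite | github.com/drixs2050/Mortal | scripts/tenhou_xml.py | choose_matching_code_index
-- ===== SOURCE A (Python) =====
-- HONOR_TILES = ('E', 'S', 'W', 'N', 'P', 'F', 'C')
--
-- JSON_RED_FIVES = {
--     51: '5mr',
--     52: '5pr',
--     53: '5sr',
-- }
--
-- def tenhou_json_tile_to_mjai(tile_id):
--     tile_id = int(tile_id)
--     if tile_id in JSON_RED_FIVES:
--         return JSON_RED_FIVES[tile_id]
--
--     suit = tile_id // 10
--     value = tile_id % 10
--     if suit == 1:
--         return f'{value}m'
--     if suit == 2: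
--         return f'{value}p'
--     if suit == 3:
--         return f'{value}s'
--     if suit == 4:
--         return HONOR_TILES[value - 1]
--     raise ValueError(f'invalid mjlog2json tile id: {tile_id}')
--
-- def deaka_mjai(pai):
--     return pai[:-1] if pai.endswith('r') else pai
--
-- def same_json_tile_kind(lhs, rhs):
--     return deaka_mjai(tenhou_json_tile_to_mjai(lhs)) == deaka_mjai(tenhou_json_tile_to_mjai(rhs))
--
-- def choose_matching_code_index(codes, preferred_code):
--     for idx, code in enumerate(codes):
--         if code == preferred_code:
--             return idx
--     for idx, code in enumerate(codes):
--         if same_json_tile_kind(code, preferred_code):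
--             return idx
--     raise ValueError(f'could not match tile {preferred_code} inside {codes}')
-- ===== SOURCE B (Python) =====
-- HONOR_TILES = ('E', 'S', 'W', 'N', 'P', 'F', 'C')
--
-- JSON_RED_FIVES = {
--     51: '5mr',
--     52: '5pr',
--     53: '5sr',
-- }
--
-- def tenhou_json_tile_to_mjai(tile_id):
--     tile_id = int(tile_id)
--     if tile_id in JSON_RED_FIVES:
--         return JSON_RED_FIVES[tile_id]
--
--     suit = tile_id // 10
--     value = tile_id % 10
--     if suit == 1:
--         return f'{value}m'
--     if suit == 2:
--         return f'{value}p'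
--     if suit == 3:
--         return f'{value}s'
--     if suit == 4:
--         return HONOR_TILES[value - 1]
--     raise ValueError(f'invalid mjlog2json tile id: {tile_id}')
--
-- def deaka_mjai(pai):
--     return pai[:-1] if pai.endswith('r') else pai
--
-- def same_json_tile_kind(lhs, rhs):
--     return deaka_mjai(tenhou_json_tile_to_mjai(lhs)) == deaka_mjai(tenhou_json_tile_to_mjai(rhs))
--
-- def choose_matching_code_index(codes, preferred_code):
--     # Single pass: return the first exact match; remember the first
--     # same-kind code as a fallback (skipping codes that do not convert).
--     fallback = None
--     for idx, code in enumerate(codes):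
--         if code == preferred_code:
--             return idx
--         if fallback is None:
--             try:
--                 if same_json_tile_kind(code, preferred_code):
--                     fallback = idx
--             except (ValueError, IndexError):
--                 pass
--     if fallback is None:
--         raise ValueError(f'could not match tile {preferred_code} inside {codes}')
--     return fallback
-- ===== Notes on version B (the rewrite author's own statement) =====
-- stated objective: alternative
-- what changed: A's two sequential scans (one for an exact match, then one for a same-kind match) are merged into a single pass that returns early on an exact match and keeps the first same-kind index as a fallback, skipping codes whose tile conversion raises.
import Mathlib
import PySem

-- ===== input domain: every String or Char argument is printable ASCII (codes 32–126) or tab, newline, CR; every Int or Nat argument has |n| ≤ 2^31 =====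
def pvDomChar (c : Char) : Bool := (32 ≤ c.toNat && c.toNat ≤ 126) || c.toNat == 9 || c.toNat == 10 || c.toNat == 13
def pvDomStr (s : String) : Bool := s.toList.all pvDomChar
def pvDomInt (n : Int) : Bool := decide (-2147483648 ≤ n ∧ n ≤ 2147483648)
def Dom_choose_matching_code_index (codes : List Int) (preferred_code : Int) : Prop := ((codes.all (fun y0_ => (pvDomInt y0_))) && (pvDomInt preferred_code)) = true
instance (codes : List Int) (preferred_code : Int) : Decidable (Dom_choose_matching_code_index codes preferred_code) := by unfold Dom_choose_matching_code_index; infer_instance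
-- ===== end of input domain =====

-- B merges A's two sequential scans into ONE pass keeping a fallback (first same-kind index);
-- same return value wherever A returns (objective: alternative decomposition, not faster).
-- Shared module helpers (tenhou_json_tile_to_mjai, deaka_mjai, same_json_tile_kind), used by
-- both Pythons; Option String is modelled as Option (List Char); none = the helper raises.
def HONOR_TILES : List (List Char) := [['E'], ['S'], ['W'], ['N'], ['P'], ['F'], ['C']]

def JSON_RED_FIVES : PySem.Dict Int (List Char) :=
  PySem.Dict.ofList [(51, ['5','m','r']), (52, ['5','p','r']), (53, ['5','s','r'])]

def tenhou_json_tile_to_mjai (tile_id : Int) : Option (List Char) :=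
  match PySem.Dict.get? JSON_RED_FIVES tile_id with
  | some v => some v
  | none =>
    let suit := PySem.Int.floordiv tile_id 10
    let value := PySem.Int.mod tile_id 10
    if suit = 1 then some (PySem.Int.toChars value ++ ['m'])
    else if suit = 2 then some (PySem.Int.toChars value ++ ['p'])
    else if suit = 3 then some (PySem.Int.toChars value ++ ['s'])
    else if suit = 4 then PySem.List.pyGet? HONOR_TILES (value - 1)  -- none = IndexError
    else none  -- raise ValueError

def deaka_mjai (pai : List Char) : List Char :=
  if PySem.Chars.endswith pai ['r'] then PySem.Chars.slice pai none (some (-1)) else pai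

-- none = one of the two conversions raised
def same_json_tile_kind (lhs rhs : Int) : Option Bool :=
  match tenhou_json_tile_to_mjai lhs, tenhou_json_tile_to_mjai rhs with
  | some a, some b => some (deaka_mjai a == deaka_mjai b)
  | _, _ => none

-- ===== PORT A =====
-- first loop of A: first exact-match index
def chooseA_loop1 : List Int → Int → Int → Option Int
  | [], _, _ => none
  | c :: rest, pref, idx => if c = pref then some idx else chooseA_loop1 rest pref (idx + 1)

-- second loop of A: first same-kind index; -1 stands for the raise (excluded by Pre_)
def chooseA_loop2 : List Int → Int → Int → Int
  | [], _, _ => -1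
  | c :: rest, pref, idx =>
    match same_json_tile_kind c pref with
    | some true => idx
    | some false => chooseA_loop2 rest pref (idx + 1)
    | none => -1

def choose_matching_code_index (codes : List Int) (preferred_code : Int) : Int :=
  match chooseA_loop1 codes preferred_code 0 with
  | some i => i
  | none => chooseA_loop2 codes preferred_code 0

-- ===== PORT B =====
-- B's single loop: early return on exact match, fallback = first same-kind index
-- (a conversion failure inside the try is skipped); -1 stands for the final raise.
def chooseB_loop : List Int → Int → Int → Option Int → Int
  | [], _, _, fb => fb.getD (-1)
  | c :: rest, pref, idx, fb =>
    if c = pref then idx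
    else
      match fb with
      | some f => chooseB_loop rest pref (idx + 1) (some f)
      | none =>
        match same_json_tile_kind c pref with
        | some true => chooseB_loop rest pref (idx + 1) (some idx)
        | _ => chooseB_loop rest pref (idx + 1) none

def choose_matching_code_index_alt (codes : List Int) (preferred_code : Int) : Int :=
  chooseB_loop codes preferred_code 0 none

-- ===== PRECONDITION & SPEC =====
-- Pre_ = exactly the inputs where Python A returns (no exception): an exact match exists, or
-- some same-kind match is reached with every earlier code convertible to a tile.
def Pre_choose_matching_code_index (codes : List Int) (preferred_code : Int) : Prop :=
  preferred_code ∈ codes ∨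
  ∃ j, j < codes.length ∧ same_json_tile_kind (codes.getD j 0) preferred_code = some true ∧
    ∀ k < j, (same_json_tile_kind (codes.getD k 0) preferred_code).isSome = true

instance (codes : List Int) (preferred_code : Int) : Decidable (Pre_choose_matching_code_index codes preferred_code) := by
  unfold Pre_choose_matching_code_index; infer_instance

def pvWitness_choose_matching_code_index : List Int × Int := ([9, 15], 15)

def Spec_choose_matching_code_index (codes : List Int) (preferred_code : Int) (out : Int) : Prop := out = choose_matching_code_index_alt codes preferred_code
instance (codes : List Int) (preferred_code : Int) (out : Int) : Decidable (Spec_choose_matching_code_index codes preferred_code out) := by unfold Spec_choose_matching_code_index; infer_instance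

-- ===== CLAIM (what is proved, stated in full; the proofs are below) =====
def Claim_equal_choose_matching_code_index : Prop := ∀ (codes : List Int) (preferred_code : Int), Dom_choose_matching_code_index codes preferred_code → Pre_choose_matching_code_index codes preferred_code → Spec_choose_matching_code_index codes preferred_code (choose_matching_code_index codes preferred_code)

-- ===== LEMMAS AND PROOFS =====

-- once the fallback is set, B only still looks for an exact match
lemma chooseB_loop_some (codes : List Int) (pref : Int) : ∀ (idx f : Int),
    chooseB_loop codes pref idx (some f) = (chooseA_loop1 codes pref idx).getD f := by
  induction codes with
  | nil => intro idx f; simp [chooseB_loop, chooseA_loop1]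
  | cons c rest ih =>
    intro idx f
    by_cases hc : c = pref <;> simp [chooseB_loop, chooseA_loop1, hc, ih]

lemma chooseA_loop1_isSome_of_mem {codes : List Int} {pref : Int} (h : pref ∈ codes) :
    ∀ idx, (chooseA_loop1 codes pref idx).isSome = true := by
  induction codes with
  | nil => cases h
  | cons c rest ih =>
    intro idx
    by_cases hc : c = pref
    · simp [chooseA_loop1, hc]
    · have : pref ∈ rest := by
        rcases List.mem_cons.mp h with h' | h'
        · exact absurd h'.symm hc
        · exact h'
      simp [chooseA_loop1, hc, ih this]

lemma main_lemma (codes : List Int) (pref : Int) : ∀ idx : Int,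
    (pref ∈ codes ∨
      ∃ j, j < codes.length ∧ same_json_tile_kind (codes.getD j 0) pref = some true ∧
        ∀ k < j, (same_json_tile_kind (codes.getD k 0) pref).isSome = true) →
    (match chooseA_loop1 codes pref idx with
      | some i => i
      | none => chooseA_loop2 codes pref idx) = chooseB_loop codes pref idx none := by
  induction codes with
  | nil =>
    intro idx h
    rcases h with h | ⟨j, hj, _⟩
    · cases h
    · simp at hj
  | cons c rest ih =>
    intro idx h
    by_cases hc : c = pref
    · simp [chooseA_loop1, chooseB_loop, hc]
    · rcases hk : same_json_tile_kind c pref with _ | b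
      · -- head conversion raises: A would raise were it to reach the 2nd loop, so pref ∈ rest
        have hmem : pref ∈ rest := by
          rcases h with h | ⟨j, hj, htrue, hvalid⟩
          · rcases List.mem_cons.mp h with h' | h'
            · exact absurd h'.symm hc
            · exact h'
          · rcases j with _ | j
            · rw [List.getD_cons_zero, hk] at htrue; cases htrue
            · have := hvalid 0 (Nat.succ_pos _)
              rw [List.getD_cons_zero, hk] at this; cases this
        obtain ⟨i, hi⟩ := Option.isSome_iff_exists.mp (chooseA_loop1_isSome_of_mem hmem (idx + 1))
        have ihr := ih (idx + 1) (Or.inl hmem)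
        rw [hi] at ihr
        simpa [chooseA_loop1, chooseB_loop, hc, hk, hi] using ihr
      · cases b
        · -- same-kind false: both step to the tail
          have hrest : pref ∈ rest ∨
              ∃ j, j < rest.length ∧ same_json_tile_kind (rest.getD j 0) pref = some true ∧
                ∀ k < j, (same_json_tile_kind (rest.getD k 0) pref).isSome = true := by
            rcases h with h | ⟨j, hj, htrue, hvalid⟩
            · rcases List.mem_cons.mp h with h' | h'
              · exact absurd h'.symm hc
              · exact Or.inl h'
            · rcases j with _ | j
              · rw [List.getD_cons_zero, hk] at htrue; cases htrue
              · refine Or.inr ⟨j, by simpa using hj, by simpa using htrue, fun k hkj => ?_⟩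
                have := hvalid (k + 1) (Nat.succ_lt_succ hkj)
                simpa using this
          have ihr := ih (idx + 1) hrest
          rcases h1 : chooseA_loop1 rest pref (idx + 1) with _ | i <;>
            · rw [h1] at ihr
              simpa [chooseA_loop1, chooseA_loop2, chooseB_loop, hc, hk, h1] using ihr
        · -- same-kind true: A's 2nd loop would stop here; B records the fallback
          rcases h1 : chooseA_loop1 rest pref (idx + 1) with _ | i <;>
            simp [chooseA_loop1, chooseA_loop2, chooseB_loop, hc, hk, h1,
              chooseB_loop_some rest pref (idx + 1) idx]

-- ===== VERDICT (by name: the statement is the Claim_ definition above) =====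
theorem choose_matching_code_index_spec : Claim_equal_choose_matching_code_index := by
  intro codes pref _ hpre
  unfold Spec_choose_matching_code_index choose_matching_code_index choose_matching_code_index_alt
  exact main_lemma codes pref 0 hpre
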